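-- pv_equiv track=rewrite | github.com/asato99w/lateral_thinking_puzzle | app/poc_v2/eval/check_reachability.py | _derivable_descriptors
-- ===== SOURCE A (Python) =====
-- def _derivable_descriptors(allowed_confirmed: set[str], descriptors: dict[str, list[list[str]]]) -> set[str]:
--     """allowed_confirmed から導出可能な全記述素を不動点計算で求める。
--
--     導出ロジック:
--     1. 導出済み集合を allowed_confirmed で初期化
--     2. 記述素が導出済み集合内と一致 → 導出
--     3. 形成条件のいずれかのグループが全て導出済み → 導出
--     4. 変化がなくなるまで繰り返す
--     """
--     derived = set(allowed_confirmed)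
--     changed = True
--     while changed:
--         changed = False
--         for did, conditions in descriptors.items():
--             if did in derived:
--                 continue
--             # 記述素が confirmed と一致する場合
--             if did in allowed_confirmed:
--                 derived.add(did)
--                 changed = True
--                 continue
--             # 形成条件が全て導出済みの場合
--             for cond_group in conditions:
--                 if all(ref in derived for ref in cond_group):
--                     derived.add(did)
--                     changed = True
--                     break
--     # 導出済み集合のうち導出記述素IDに該当するものを返す
--     return {did for did in derived if did in descriptors}
-- ===== SOURCE B (Python) =====
-- def _derivable_descriptors(allowed_confirmed: set[str], descriptors: dict[str, list[list[str]]]) -> set[str]: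
--     """Worklist propagation: index each condition group on its not-yet-derived refs once,
--     then propagate each newly-derived descriptor through that index (no repeated full passes)."""
--     derived = set(allowed_confirmed)
--     waiters = {}  # ref -> list of (did, group) occurrences waiting on ref
--     queue = []    # newly derived dids still to be propagated (stack)
--     for did, conditions in descriptors.items():
--         for group in conditions:
--             ok = True
--             for r in group:
--                 if r not in derived:
--                     waiters.setdefault(r, []).append((did, group))
--                     ok = False
--             if ok and did not in derived:
--                 derived.add(did)
--                 queue.append(did)
--     while queue:
--         x = queue.pop()
--         for did, group in waiters.get(x, ()):
--             if did not in derived and all(r in derived for r in group):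
--                 derived.add(did)
--                 queue.append(did)
--     return {did for did in descriptors if did in derived}
-- ===== Notes on version B (the rewrite author's own statement) =====
-- stated objective: alternative
-- what changed: Replaces the repeated full-pass fixed-point scan with a one-shot index from refs to waiting condition groups plus a worklist that rechecks a group only when one of its refs is newly derived.
import Mathlib
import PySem

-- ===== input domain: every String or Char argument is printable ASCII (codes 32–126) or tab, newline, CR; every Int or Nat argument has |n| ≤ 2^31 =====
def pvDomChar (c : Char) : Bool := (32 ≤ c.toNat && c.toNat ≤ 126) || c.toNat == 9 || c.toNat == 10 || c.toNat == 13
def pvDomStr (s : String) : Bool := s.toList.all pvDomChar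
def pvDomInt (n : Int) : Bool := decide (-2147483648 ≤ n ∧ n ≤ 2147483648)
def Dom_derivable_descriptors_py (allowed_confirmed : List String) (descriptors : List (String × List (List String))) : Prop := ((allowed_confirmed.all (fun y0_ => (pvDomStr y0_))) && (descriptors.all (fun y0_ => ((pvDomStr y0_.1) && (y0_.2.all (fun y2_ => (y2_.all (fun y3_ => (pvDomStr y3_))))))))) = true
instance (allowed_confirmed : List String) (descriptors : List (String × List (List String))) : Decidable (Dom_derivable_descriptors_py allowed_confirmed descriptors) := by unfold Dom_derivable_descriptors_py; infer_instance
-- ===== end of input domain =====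

-- B replaces A's repeated full fixed-point passes by a once-built ref→groups index plus a worklist
-- that revisits a condition group only when one of its refs is newly derived (objective: alternative).
-- Both Pythons return a set; a Python set's hash iteration order is not modelled, so both ports
-- emit the result set canonically in the descriptors' key order (equal to the Python result AS A SET).

-- ===== PORT A =====
-- body of `for did, conditions in descriptors.items(): …`; state = (derived, changed);
-- the `for cond_group in conditions: … break` inner loop is List.any
def dpyA_step (allowed_confirmed : List String) (st : PySem.Set String × Bool)
    (p : String × List (List String)) : PySem.Set String × Bool :=
  if PySem.Set.contains st.1 p.1 then st
  else if PySem.Set.contains allowed_confirmed p.1 then (PySem.Set.add st.1 p.1, true)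
  else if p.2.any (fun g => g.all (fun r => PySem.Set.contains st.1 r)) then
    (PySem.Set.add st.1 p.1, true)
  else st

-- one pass of the `while changed:` body
def dpyA_pass (allowed_confirmed : List String) (descriptors : List (String × List (List String)))
    (derived : PySem.Set String) : PySem.Set String × Bool :=
  descriptors.foldl (dpyA_step allowed_confirmed) (derived, false)

-- `while changed: …`; fuel `descriptors.length + 1` is never exhausted: every pass with
-- changed=True adds at least one new descriptor key to `derived` (proved below)
def dpyA_loop (allowed_confirmed : List String) (descriptors : List (String × List (List String))) :
    Nat → PySem.Set String → PySem.Set String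
  | 0, derived => derived
  | n + 1, derived =>
    let st := dpyA_pass allowed_confirmed descriptors derived
    if st.2 then dpyA_loop allowed_confirmed descriptors n st.1 else st.1

def derivable_descriptors_py (allowed_confirmed : List String) (descriptors : List (String × List (List String))) : List String :=
  let derived := PySem.Set.ofList allowed_confirmed
  let final := dpyA_loop allowed_confirmed descriptors (descriptors.length + 1) derived
  -- `{did for did in derived if did in descriptors}` iterates a set (hash order unmodelled);
  -- the result set is emitted canonically in the descriptors' key order — the same set
  PySem.Set.ofList ((descriptors.map Prod.fst).filter (fun did => PySem.Set.contains final did))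

-- ===== PORT B =====
-- `for r in group: if r not in derived: waiters.setdefault(r, []).append((did, group)); ok = False`
def dpyB_reg (did : String) (g : List String) (derived : PySem.Set String)
    (waiters : PySem.Dict String (List (String × List String))) :
    PySem.Dict String (List (String × List String)) × Bool :=
  g.foldl (fun st2 r =>
    if PySem.Set.contains derived r then st2
    else (PySem.Dict.modify st2.1 r [] (fun l => l ++ [(did, g)]), false)) (waiters, true)

-- one `for group in conditions:` body; state = (derived, queue, waiters);
-- Python's queue uses `append`/`pop()` (LIFO), the port keeps the stack top at the list head
def dpyB_group (did : String)
    (st : PySem.Set String × List String × PySem.Dict String (List (String × List String)))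
    (g : List String) :
    PySem.Set String × List String × PySem.Dict String (List (String × List String)) :=
  let reg := dpyB_reg did g st.1 st.2.2
  if reg.2 && !(PySem.Set.contains st.1 did) then
    (PySem.Set.add st.1 did, did :: st.2.1, reg.1)
  else (st.1, st.2.1, reg.1)

-- `for did, conditions in descriptors.items():` of the indexing pass
def dpyB_init (descriptors : List (String × List (List String))) (derived0 : PySem.Set String) :
    PySem.Set String × List String × PySem.Dict String (List (String × List String)) :=
  descriptors.foldl (fun st p => p.2.foldl (dpyB_group p.1) st) (derived0, [], PySem.Dict.empty)

-- body of `for did, group in waiters.get(x, ()): …`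
def dpyB_tstep (st : PySem.Set String × List String) (pr : String × List String) :
    PySem.Set String × List String :=
  if !(PySem.Set.contains st.1 pr.1) && pr.2.all (fun r => PySem.Set.contains st.1 r) then
    (PySem.Set.add st.1 pr.1, pr.1 :: st.2)
  else st

def dpyB_trigger (waiters : PySem.Dict String (List (String × List String))) (x : String)
    (derived : PySem.Set String) (queue : List String) : PySem.Set String × List String :=
  (PySem.Dict.getD waiters x []).foldl dpyB_tstep (derived, queue)

-- `while queue: x = queue.pop(); …`; the fuel is never exhausted: every pop shrinks the
-- measure |queue| + #(descriptor keys not yet derived) (proved below)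
def dpyB_loop (waiters : PySem.Dict String (List (String × List String))) :
    Nat → PySem.Set String → List String → PySem.Set String
  | 0, derived, _ => derived
  | _ + 1, derived, [] => derived
  | n + 1, derived, x :: queue =>
    let st := dpyB_trigger waiters x derived queue
    dpyB_loop waiters n st.1 st.2

def derivable_descriptors_py_alt (allowed_confirmed : List String) (descriptors : List (String × List (List String))) : List String :=
  let derived0 := PySem.Set.ofList allowed_confirmed
  let st := dpyB_init descriptors derived0
  let final := dpyB_loop st.2.2 (descriptors.length + st.2.1.length + 1) st.1 st.2.1
  -- `{did for did in descriptors if did in derived}` in the dict's key order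
  PySem.Set.ofList ((descriptors.map Prod.fst).filter (fun did => PySem.Set.contains final did))

-- ===== PRECONDITION & SPEC =====
def Spec_derivable_descriptors_py (allowed_confirmed : List String) (descriptors : List (String × List (List String))) (out : List String) : Prop := out = derivable_descriptors_py_alt allowed_confirmed descriptors
instance (allowed_confirmed : List String) (descriptors : List (String × List (List String))) (out : List String) : Decidable (Spec_derivable_descriptors_py allowed_confirmed descriptors out) := by unfold Spec_derivable_descriptors_py; infer_instance

-- ===== CLAIM (what is proved, stated in full; the proofs are below) =====
def Claim_equal_derivable_descriptors_py : Prop := ∀ (allowed_confirmed : List String) (descriptors : List (String × List (List String))), Dom_derivable_descriptors_py allowed_confirmed descriptors → Spec_derivable_descriptors_py allowed_confirmed descriptors (derivable_descriptors_py allowed_confirmed descriptors)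

-- ===== LEMMAS AND PROOFS =====

-- the least set containing allowed_confirmed and closed under the group rule:
-- both programs' `derived` sets consist exactly of the strings satisfying `Deriv`
inductive Deriv (ac : List String) (ds : List (String × List (List String))) : String → Prop
  | base (x : String) : x ∈ ac → Deriv ac ds x
  | step (did : String) (conds : List (List String)) (g : List String) :
      (did, conds) ∈ ds → g ∈ conds → (∀ r ∈ g, Deriv ac ds r) → Deriv ac ds did

def SoundS (ac : List String) (ds : List (String × List (List String))) (s : PySem.Set String) : Prop :=
  ∀ x ∈ s, Deriv ac ds x

def ClosedS (ds : List (String × List (List String))) (s : PySem.Set String) : Prop :=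
  ∀ p ∈ ds, ∀ g ∈ p.2, (∀ r ∈ g, r ∈ s) → p.1 ∈ s

theorem deriv_mem_of_closed (ac : List String) (ds : List (String × List (List String)))
    (s : PySem.Set String) (hac : ∀ x ∈ ac, x ∈ s) (hcl : ClosedS ds s) :
    ∀ x, Deriv ac ds x → x ∈ s := by
  intro x hx
  induction hx with
  | base x h => exact hac x h
  | step did conds g hmem hg _ ih => exact hcl (did, conds) hmem g hg ih

-- number of descriptor-key occurrences not yet derived: the termination measure of both loops
def missing (keys : List String) (s : PySem.Set String) : Nat :=
  keys.countP (fun k => decide (k ∉ s))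

theorem missing_mono (keys : List String) (s s' : PySem.Set String)
    (h : ∀ x ∈ s, x ∈ s') : missing keys s' ≤ missing keys s := by
  unfold missing
  apply List.countP_mono_left
  intro a _ ha
  simp only [decide_eq_true_eq] at *
  exact fun hs => ha (h a hs)

theorem missing_lt (keys : List String) (s s' : PySem.Set String)
    (h : ∀ x ∈ s, x ∈ s') (k : String) (hk : k ∈ keys) (hks : k ∉ s) (hks' : k ∈ s') :
    missing keys s' < missing keys s := by
  unfold missing
  induction keys with
  | nil => cases hk
  | cons a l ih =>
    rw [List.countP_cons, List.countP_cons]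
    have hle : List.countP (fun k => decide (k ∉ s')) l ≤ List.countP (fun k => decide (k ∉ s)) l :=
      missing_mono l s s' h
    rcases List.mem_cons.1 hk with h1 | h1
    · subst h1
      have e1 : (if (decide (k ∉ s') : Bool) = true then 1 else 0) = 0 := by simp [hks']
      have e2 : (if (decide (k ∉ s) : Bool) = true then 1 else 0) = 1 := by simp [hks]
      rw [e1, e2]
      omega
    · have hlt := ih h1
      have e3 : (if (decide (a ∉ s') : Bool) = true then 1 else 0) ≤
          (if (decide (a ∉ s) : Bool) = true then 1 else 0) := by
        by_cases ha' : a ∈ s'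
        · simp [ha']
        · have ha : a ∉ s := fun hs_ => ha' (h a hs_)
          simp [ha, ha']
      omega

theorem missing_le_length (keys : List String) (s : PySem.Set String) :
    missing keys s ≤ keys.length := List.countP_le_length

-- ---- port A ----

theorem dpyA_step_mono (ac : List String) (st : PySem.Set String × Bool)
    (p : String × List (List String)) (x : String) (hx : x ∈ st.1) :
    x ∈ (dpyA_step ac st p).1 := by
  unfold dpyA_step
  split_ifs <;> simp [PySem.Set.mem_add, hx]

theorem dpyA_fold_mono (ac : List String) (l : List (String × List (List String)))
    (st : PySem.Set String × Bool) (x : String) (hx : x ∈ st.1) :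
    x ∈ (l.foldl (dpyA_step ac) st).1 := by
  induction l generalizing st with
  | nil => exact hx
  | cons p l ih => exact ih _ (dpyA_step_mono ac st p x hx)

theorem dpyA_fold_sound (ac : List String) (ds l : List (String × List (List String)))
    (hl : ∀ p ∈ l, p ∈ ds) (st : PySem.Set String × Bool) (hs : SoundS ac ds st.1) :
    SoundS ac ds (l.foldl (dpyA_step ac) st).1 := by
  induction l generalizing st with
  | nil => exact hs
  | cons p l ih =>
    refine ih (fun q hq => hl q (List.mem_cons_of_mem p hq)) _ ?_
    unfold dpyA_step
    split_ifs with h1 h2 h3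
    · exact hs
    · intro x hx
      rcases (PySem.Set.mem_add _ _ _).1 hx with h | h
      · exact hs x h
      · subst h
        exact Deriv.base _ ((PySem.Set.contains_iff ac p.1).1 h2)
    · intro x hx
      rcases (PySem.Set.mem_add _ _ _).1 hx with h | h
      · exact hs x h
      · subst h
        rcases List.any_eq_true.1 h3 with ⟨g, hg, hall⟩
        refine Deriv.step p.1 p.2 g (hl p (List.mem_cons_self)) hg ?_
        intro r hr
        exact hs r ((PySem.Set.contains_iff _ _).1 (List.all_eq_true.1 hall r hr))
    · exact hs

theorem dpyA_fold_changed (ac : List String) (l : List (String × List (List String)))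
    (st : PySem.Set String × Bool) (h : st.2 = true) :
    (l.foldl (dpyA_step ac) st).2 = true := by
  induction l generalizing st with
  | nil => exact h
  | cons p l ih =>
    refine ih _ ?_
    unfold dpyA_step
    split_ifs <;> simp [h]

theorem dpyA_fold_false (ac : List String) (l : List (String × List (List String)))
    (st : PySem.Set String × Bool) (h : (l.foldl (dpyA_step ac) st).2 = false) :
    l.foldl (dpyA_step ac) st = st ∧
      ∀ p ∈ l, (∃ g ∈ p.2, ∀ r ∈ g, r ∈ st.1) → p.1 ∈ st.1 := by
  induction l generalizing st with
  | nil => exact ⟨rfl, by intro p hp; cases hp⟩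
  | cons p l ih =>
    have hst2 : st.2 = false := by
      cases hx : st.2
      · rfl
      · rw [dpyA_fold_changed ac (p :: l) st hx] at h; cases h
    have h' : (l.foldl (dpyA_step ac) (dpyA_step ac st p)).2 = false := h
    have hsf : (dpyA_step ac st p).2 = false := by
      cases hx : (dpyA_step ac st p).2
      · rfl
      · rw [dpyA_fold_changed ac l _ hx] at h'; cases h'
    have hstep : dpyA_step ac st p = st := by
      unfold dpyA_step at hsf ⊢
      split_ifs at hsf ⊢ <;> simp_all
    obtain ⟨heq, hrest⟩ := ih _ h'
    rw [hstep] at heq hrest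
    have hfold : (p :: l).foldl (dpyA_step ac) st = l.foldl (dpyA_step ac) st := by
      simp [List.foldl_cons, hstep]
    refine ⟨by rw [hfold, heq], ?_⟩
    intro q hq hcond
    rcases List.mem_cons.1 hq with h1 | h1
    · subst h1
      unfold dpyA_step at hstep
      split_ifs at hstep with hc1 hc2 hc3
      · exact (PySem.Set.contains_iff _ _).1 hc1
      · have h5 := congrArg Prod.snd hstep
        simp [hst2] at h5
      · have h5 := congrArg Prod.snd hstep
        simp [hst2] at h5
      · exfalso
        rcases hcond with ⟨g, hg, hall⟩
        exact hc3 (List.any_eq_true.2 ⟨g, hg, List.all_eq_true.2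
          (fun r hr => (PySem.Set.contains_iff _ _).2 (hall r hr))⟩)
    · exact hrest q h1 hcond

theorem dpyA_fold_true_new (ac : List String) (l : List (String × List (List String)))
    (st : PySem.Set String × Bool) (h0 : st.2 = false)
    (h : (l.foldl (dpyA_step ac) st).2 = true) :
    ∃ k ∈ l.map Prod.fst, k ∉ st.1 ∧ k ∈ (l.foldl (dpyA_step ac) st).1 := by
  induction l generalizing st with
  | nil => rw [List.foldl_nil] at h; rw [h0] at h; cases h
  | cons p l ih =>
    by_cases hstep : dpyA_step ac st p = st
    · have hfold : (p :: l).foldl (dpyA_step ac) st = l.foldl (dpyA_step ac) st := by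
        simp [List.foldl_cons, hstep]
      rw [hfold] at h ⊢
      obtain ⟨k, hk, hk1, hk2⟩ := ih st h0 h
      exact ⟨k, List.mem_cons_of_mem _ hk, hk1, hk2⟩
    · have hmem : p.1 ∉ st.1 ∧ p.1 ∈ (dpyA_step ac st p).1 := by
        unfold dpyA_step at hstep ⊢
        split_ifs at hstep ⊢ with hc1 hc2 hc3
        · exact absurd rfl hstep
        · refine ⟨fun hm => ?_, (PySem.Set.mem_add _ _ _).2 (Or.inr rfl)⟩
          first
          | exact hc1 hm
          | exact hc1 ((PySem.Set.contains_iff _ _).2 hm)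
        · refine ⟨fun hm => ?_, (PySem.Set.mem_add _ _ _).2 (Or.inr rfl)⟩
          first
          | exact hc1 hm
          | exact hc1 ((PySem.Set.contains_iff _ _).2 hm)
        · exact absurd rfl hstep
      refine ⟨p.1, List.mem_cons_self, hmem.1, ?_⟩
      exact dpyA_fold_mono ac l _ p.1 hmem.2

theorem dpyA_loop_spec (ac : List String) (ds : List (String × List (List String))) :
    ∀ n derived, missing (ds.map Prod.fst) derived < n → SoundS ac ds derived →
      (∀ x ∈ derived, x ∈ dpyA_loop ac ds n derived) ∧
      SoundS ac ds (dpyA_loop ac ds n derived) ∧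
      ClosedS ds (dpyA_loop ac ds n derived) := by
  intro n
  induction n with
  | zero => intro derived h; omega
  | succ n ih =>
    intro derived h hs
    have hL : dpyA_loop ac ds (n + 1) derived =
        (if (dpyA_pass ac ds derived).2 = true then
          dpyA_loop ac ds n (dpyA_pass ac ds derived).1
        else (dpyA_pass ac ds derived).1) := rfl
    rw [hL]
    by_cases hb : (dpyA_pass ac ds derived).2 = true
    · rw [if_pos hb]
      obtain ⟨k, hk, hk1, hk2⟩ := dpyA_fold_true_new ac ds (derived, false) rfl hb
      have hmono : ∀ x ∈ derived, x ∈ (dpyA_pass ac ds derived).1 :=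
        fun x hx => dpyA_fold_mono ac ds (derived, false) x hx
      have hlt : missing (ds.map Prod.fst) (dpyA_pass ac ds derived).1 < n := by
        have := missing_lt (ds.map Prod.fst) derived (dpyA_pass ac ds derived).1 hmono k hk hk1 hk2
        omega
      have hsnd : SoundS ac ds (dpyA_pass ac ds derived).1 :=
        dpyA_fold_sound ac ds ds (fun p hp => hp) (derived, false) hs
      obtain ⟨m1, m2, m3⟩ := ih (dpyA_pass ac ds derived).1 hlt hsnd
      exact ⟨fun x hx => m1 x (hmono x hx), m2, m3⟩
    · rw [if_neg hb]
      have hb' : (dpyA_pass ac ds derived).2 = false := by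
        cases hx : (dpyA_pass ac ds derived).2
        · rfl
        · exact absurd hx hb
      obtain ⟨heq, hcl⟩ := dpyA_fold_false ac ds (derived, false) hb'
      have h1 : (dpyA_pass ac ds derived).1 = derived := by
        unfold dpyA_pass; rw [heq]
      rw [h1]
      exact ⟨fun x hx => hx, hs, fun p hp g hg hall => hcl p hp ⟨g, hg, hall⟩⟩

-- A's final derived set contains exactly the `Deriv`-derivable strings
theorem dpyA_final_iff (ac : List String) (ds : List (String × List (List String))) (x : String) :
    x ∈ dpyA_loop ac ds (ds.length + 1) (PySem.Set.ofList ac) ↔ Deriv ac ds x := by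
  have hm : missing (ds.map Prod.fst) (PySem.Set.ofList ac) < ds.length + 1 := by
    have := missing_le_length (ds.map Prod.fst) (PySem.Set.ofList ac)
    simp only [List.length_map] at this
    omega
  have hs : SoundS ac ds (PySem.Set.ofList ac) :=
    fun x hx => Deriv.base x ((PySem.Set.mem_ofList ac x).1 hx)
  obtain ⟨m1, m2, m3⟩ := dpyA_loop_spec ac ds (ds.length + 1) (PySem.Set.ofList ac) hm hs
  constructor
  · exact fun h => m2 x h
  · exact deriv_mem_of_closed ac ds _
      (fun y hy => m1 y ((PySem.Set.mem_ofList ac y).2 hy)) m3 x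

-- ---- port B ----

def EntriesOK (ds : List (String × List (List String)))
    (W : PySem.Dict String (List (String × List String))) : Prop :=
  ∀ r pr, pr ∈ PySem.Dict.getD W r [] → ∃ conds, (pr.1, conds) ∈ ds ∧ pr.2 ∈ conds

-- registration invariant: every group ref not in the final init `derived` is indexed
def RegOne (W : PySem.Dict String (List (String × List String)))
    (s : PySem.Set String) (did : String) (g : List String) : Prop :=
  ∀ r ∈ g, r ∉ s → (did, g) ∈ PySem.Dict.getD W r []

-- coverage invariant: a group is satisfied-and-derived, or waits on a ref that is
-- either underived or still unprocessed (in the queue)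
def CovOne (W : PySem.Dict String (List (String × List String)))
    (s : PySem.Set String) (q : List String) (did : String) (g : List String) : Prop :=
  did ∈ s ∨ ∃ r ∈ g, (r ∉ s ∨ r ∈ q) ∧ (did, g) ∈ PySem.Dict.getD W r []

-- ---- trigger (inner worklist) lemmas ----

theorem dpyB_tfold_dmono (L : List (String × List String)) (st : PySem.Set String × List String)
    (x : String) (hx : x ∈ st.1) : x ∈ (L.foldl dpyB_tstep st).1 := by
  induction L generalizing st with
  | nil => exact hx
  | cons pr L ih =>
    refine ih _ ?_
    unfold dpyB_tstep
    split_ifs <;> simp [PySem.Set.mem_add, hx]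

theorem dpyB_tfold_qmono (L : List (String × List String)) (st : PySem.Set String × List String)
    (y : String) (hy : y ∈ st.2) : y ∈ (L.foldl dpyB_tstep st).2 := by
  induction L generalizing st with
  | nil => exact hy
  | cons pr L ih =>
    refine ih _ ?_
    unfold dpyB_tstep
    split_ifs <;> simp [hy]

theorem dpyB_tfold_new (L : List (String × List String)) (st : PySem.Set String × List String)
    (y : String) (hy : y ∈ (L.foldl dpyB_tstep st).1) :
    y ∈ st.1 ∨ y ∈ (L.foldl dpyB_tstep st).2 := by
  induction L generalizing st with
  | nil => exact Or.inl hy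
  | cons pr L ih =>
    rcases ih (dpyB_tstep st pr) hy with h | h
    · unfold dpyB_tstep at h
      split_ifs at h with hg
      · rcases (PySem.Set.mem_add _ _ _).1 h with h1 | h1
        · exact Or.inl h1
        · subst h1
          refine Or.inr (dpyB_tfold_qmono L _ _ ?_)
          unfold dpyB_tstep
          rw [if_pos hg]
          exact List.mem_cons_self
      · exact Or.inl h
    · exact Or.inr h

theorem dpyB_tfold_sound (ac : List String) (ds : List (String × List (List String)))
    (L : List (String × List String))
    (hL : ∀ pr ∈ L, ∃ conds, (pr.1, conds) ∈ ds ∧ pr.2 ∈ conds)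
    (st : PySem.Set String × List String) (hs : SoundS ac ds st.1) :
    SoundS ac ds (L.foldl dpyB_tstep st).1 := by
  induction L generalizing st with
  | nil => exact hs
  | cons pr L ih =>
    refine ih (fun q hq => hL q (List.mem_cons_of_mem pr hq)) _ ?_
    unfold dpyB_tstep
    split_ifs with hg
    · intro y hy
      rcases (PySem.Set.mem_add _ _ _).1 hy with h | h
      · exact hs y h
      · subst h
        obtain ⟨conds, hc1, hc2⟩ := hL pr List.mem_cons_self
        rw [Bool.and_eq_true] at hg
        have hall := hg.2
        refine Deriv.step pr.1 conds pr.2 hc1 hc2 ?_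
        intro r hr
        exact hs r ((PySem.Set.contains_iff _ _).1 (List.all_eq_true.1 hall r hr))
    · exact hs

theorem dpyB_tfold_measure (keys : List String) (L : List (String × List String))
    (hL : ∀ pr ∈ L, pr.1 ∈ keys) (st : PySem.Set String × List String) :
    (L.foldl dpyB_tstep st).2.length + missing keys (L.foldl dpyB_tstep st).1 ≤
      st.2.length + missing keys st.1 := by
  induction L generalizing st with
  | nil => exact le_refl _
  | cons pr L ih =>
    refine le_trans (ih (fun q hq => hL q (List.mem_cons_of_mem pr hq)) (dpyB_tstep st pr)) ?_
    unfold dpyB_tstep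
    split_ifs with hg
    · have hnm : pr.1 ∉ st.1 := by
        intro hm
        rw [Bool.and_eq_true] at hg
        have h6 := hg.1
        rw [Bool.not_eq_true'] at h6
        rw [(PySem.Set.contains_iff _ _).2 hm] at h6
        cases h6
      have hlt := missing_lt keys st.1 (PySem.Set.add st.1 pr.1)
        (fun y hy => (PySem.Set.mem_add _ _ _).2 (Or.inl hy)) pr.1
        (hL pr List.mem_cons_self) hnm ((PySem.Set.mem_add _ _ _).2 (Or.inr rfl))
      simp only [List.length_cons]
      omega
    · exact le_refl _

theorem dpyB_tfold_handled (L : List (String × List String)) (dOld : PySem.Set String)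
    (st : PySem.Set String × List String) (hsub : ∀ y ∈ dOld, y ∈ st.1) :
    ∀ pr ∈ L, pr.1 ∈ (L.foldl dpyB_tstep st).1 ∨
      ∃ r ∈ pr.2, r ∉ dOld ∧ (r ∉ (L.foldl dpyB_tstep st).1 ∨ r ∈ (L.foldl dpyB_tstep st).2) := by
  induction L generalizing st with
  | nil => intro pr hpr; cases hpr
  | cons pr0 L ih =>
    intro pr hpr
    have hmono0 : ∀ y ∈ st.1, y ∈ (dpyB_tstep st pr0).1 := by
      intro y hy
      unfold dpyB_tstep
      split_ifs <;> simp [PySem.Set.mem_add, hy]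
    have hsub' : ∀ y ∈ dOld, y ∈ (dpyB_tstep st pr0).1 := fun y hy => hmono0 y (hsub y hy)
    have hfold : (pr0 :: L).foldl dpyB_tstep st = L.foldl dpyB_tstep (dpyB_tstep st pr0) := rfl
    rw [hfold]
    rcases List.mem_cons.1 hpr with h1 | h1
    · subst h1
      by_cases hg : (!(PySem.Set.contains st.1 pr.1) && pr.2.all (fun r => PySem.Set.contains st.1 r)) = true
      · left
        refine dpyB_tfold_dmono L _ _ ?_
        unfold dpyB_tstep
        rw [if_pos hg]
        exact (PySem.Set.mem_add _ _ _).2 (Or.inr rfl)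
      · have hst : dpyB_tstep st pr = st := by
          unfold dpyB_tstep
          rw [if_neg hg]
        by_cases hc : pr.1 ∈ st.1
        · exact Or.inl (dpyB_tfold_dmono L _ _ (by rw [hst]; exact hc))
        · have hex : ∃ r ∈ pr.2, r ∉ st.1 := by
            by_contra hno
            push_neg at hno
            apply hg
            rw [Bool.and_eq_true]
            refine ⟨?_, List.all_eq_true.2 fun r hr => (PySem.Set.contains_iff _ _).2 (hno r hr)⟩
            rw [Bool.not_eq_true']
            cases hcc : PySem.Set.contains st.1 pr.1
            · rfl
            · exact absurd ((PySem.Set.contains_iff _ _).1 hcc) hc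
          obtain ⟨r, hr, hrn⟩ := hex
          refine Or.inr ⟨r, hr, fun hd => hrn (hsub r hd), ?_⟩
          rw [hst]
          by_cases hfin : r ∈ (L.foldl dpyB_tstep st).1
          · rcases dpyB_tfold_new L st r hfin with h2 | h2
            · exact absurd h2 hrn
            · exact Or.inr h2
          · exact Or.inl hfin
    · rcases ih (dpyB_tstep st pr0) hsub' pr h1 with h | h
      · exact Or.inl h
      · exact Or.inr h

theorem dpyB_loop_spec (ac : List String) (ds : List (String × List (List String)))
    (W : PySem.Dict String (List (String × List String))) (d1 : PySem.Set String)
    (hE : EntriesOK ds W)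
    (hReg : ∀ p ∈ ds, ∀ g ∈ p.2, RegOne W d1 p.1 g) :
    ∀ n derived queue,
      (∀ y ∈ d1, y ∈ derived) →
      SoundS ac ds derived →
      (∀ p ∈ ds, ∀ g ∈ p.2, CovOne W derived queue p.1 g) →
      queue.length + missing (ds.map Prod.fst) derived < n →
      (∀ y ∈ derived, y ∈ dpyB_loop W n derived queue) ∧
      SoundS ac ds (dpyB_loop W n derived queue) ∧
      ClosedS ds (dpyB_loop W n derived queue) := by
  intro n
  induction n with
  | zero => intro derived queue _ _ _ h; omega
  | succ n ih =>
    intro derived queue hd1 hs hcov hn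
    match queue with
    | [] =>
      refine ⟨fun y hy => hy, hs, ?_⟩
      intro p hp g hg hall
      rcases hcov p hp g hg with h | ⟨r, hr, hw, _⟩
      · exact h
      · rcases hw with h | h
        · exact absurd (hall r hr) h
        · cases h
    | x :: rest =>
      show (∀ y ∈ derived, y ∈ dpyB_loop W n (dpyB_trigger W x derived rest).1
          (dpyB_trigger W x derived rest).2) ∧ _ ∧ _
      set st := dpyB_trigger W x derived rest with hst
      have hLkeys : ∀ pr ∈ PySem.Dict.getD W x [], pr.1 ∈ ds.map Prod.fst := by
        intro pr hpr
        obtain ⟨conds, hc, _⟩ := hE x pr hpr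
        exact List.mem_map.2 ⟨(pr.1, conds), hc, rfl⟩
      have hdm : ∀ y ∈ derived, y ∈ st.1 :=
        fun y hy => dpyB_tfold_dmono _ (derived, rest) y hy
      have hqm : ∀ y ∈ rest, y ∈ st.2 :=
        fun y hy => dpyB_tfold_qmono _ (derived, rest) y hy
      have hsnd : SoundS ac ds st.1 :=
        dpyB_tfold_sound ac ds _ (fun pr hpr => hE x pr hpr) (derived, rest) hs
      have hcov' : ∀ p ∈ ds, ∀ g ∈ p.2, CovOne W st.1 st.2 p.1 g := by
        intro p hp g hg
        rcases hcov p hp g hg with h | ⟨r, hr, hw, hreg⟩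
        · exact Or.inl (hdm p.1 h)
        · rcases hw with hnd | hq
          · by_cases hin : r ∈ st.1
            · rcases dpyB_tfold_new _ (derived, rest) r hin with h2 | h2
              · exact absurd h2 hnd
              · exact Or.inr ⟨r, hr, Or.inr h2, hreg⟩
            · exact Or.inr ⟨r, hr, Or.inl hin, hreg⟩
          · rcases List.mem_cons.1 hq with hq1 | hq1
            · -- the witness ref is exactly the popped x: its waiter list is processed now
              subst hq1
              rcases dpyB_tfold_handled (PySem.Dict.getD W r []) derived (derived, rest)
                  (fun y hy => hy) (p.1, g) hreg with h2 | ⟨r', hr', hnd', h2⟩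
              · exact Or.inl h2
              · have hreg' : (p.1, g) ∈ PySem.Dict.getD W r' [] :=
                  hReg p hp g hg r' hr' (fun hm => hnd' (hd1 r' hm))
                exact Or.inr ⟨r', hr', by
                  rcases h2 with h3 | h3
                  · exact Or.inl h3
                  · exact Or.inr h3, hreg'⟩
            · exact Or.inr ⟨r, hr, Or.inr (hqm r hq1), hreg⟩
      have hmeas : st.2.length + missing (ds.map Prod.fst) st.1 ≤
          rest.length + missing (ds.map Prod.fst) derived :=
        dpyB_tfold_measure _ _ hLkeys (derived, rest)
      have hn' : st.2.length + missing (ds.map Prod.fst) st.1 < n := by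
        simp only [List.length_cons] at hn
        omega
      obtain ⟨m1, m2, m3⟩ := ih st.1 st.2 (fun y hy => hdm y (hd1 y hy)) hsnd hcov' hn'
      exact ⟨fun y hy => m1 y (hdm y hy), m2, m3⟩

-- ---- init (indexing pass) lemmas ----

-- ---- init (indexing pass) lemmas ----

def regStep (did : String) (g : List String) (derived : PySem.Set String) :
    PySem.Dict String (List (String × List String)) × Bool → String →
    PySem.Dict String (List (String × List String)) × Bool :=
  fun st2 r =>
    if PySem.Set.contains derived r then st2
    else (PySem.Dict.modify st2.1 r [] (fun l => l ++ [(did, g)]), false)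

theorem dpyB_reg_eq (did : String) (g : List String) (derived : PySem.Set String)
    (W : PySem.Dict String (List (String × List String))) :
    dpyB_reg did g derived W = g.foldl (regStep did g derived) (W, true) := rfl

theorem pv_getD_modify (d : PySem.Dict String (List (String × List String))) (k r : String)
    (f : List (String × List String) → List (String × List String)) :
    PySem.Dict.getD (PySem.Dict.modify d k [] f) r [] =
      if r = k then f (PySem.Dict.getD d k []) else PySem.Dict.getD d r [] := by
  by_cases h : r = k
  · subst h; simp [pysem]
  · simp [pysem, h]

theorem regfold_true (did : String) (g : List String) (derived : PySem.Set String) :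
    ∀ (l : List String) (st2 : PySem.Dict String (List (String × List String)) × Bool),
      (l.foldl (regStep did g derived) st2).2 = true → st2.2 = true ∧ ∀ r ∈ l, r ∈ derived := by
  intro l
  induction l with
  | nil => exact fun st2 h => ⟨h, by intro r hr; cases hr⟩
  | cons r0 l ih =>
    intro st2 h
    obtain ⟨h1, h2⟩ := ih (regStep did g derived st2 r0) h
    unfold regStep at h1
    split_ifs at h1 with hc
    refine ⟨h1, ?_⟩
    intro r hr
    rcases List.mem_cons.1 hr with h3 | h3
    · subst h3; exact (PySem.Set.contains_iff _ _).1 hc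
    · exact h2 r h3

theorem regfold_eq_of_all (did : String) (g : List String) (derived : PySem.Set String)
    (l : List String) (st2 : PySem.Dict String (List (String × List String)) × Bool)
    (h : ∀ r ∈ l, r ∈ derived) : l.foldl (regStep did g derived) st2 = st2 := by
  induction l generalizing st2 with
  | nil => rfl
  | cons r0 l ih =>
    have hstep : regStep did g derived st2 r0 = st2 := by
      unfold regStep
      rw [if_pos ((PySem.Set.contains_iff _ _).2 (h r0 List.mem_cons_self))]
    have : (r0 :: l).foldl (regStep did g derived) st2 =
        l.foldl (regStep did g derived) st2 := by
      simp [List.foldl_cons, hstep]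
    rw [this]
    exact ih _ (fun r hr => h r (List.mem_cons_of_mem r0 hr))

theorem regfold_mono (did : String) (g : List String) (derived : PySem.Set String)
    (l : List String) (st2 : PySem.Dict String (List (String × List String)) × Bool)
    (r : String) (pr : String × List String) (h : pr ∈ PySem.Dict.getD st2.1 r []) :
    pr ∈ PySem.Dict.getD (l.foldl (regStep did g derived) st2).1 r [] := by
  induction l generalizing st2 with
  | nil => exact h
  | cons r0 l ih =>
    refine ih _ ?_
    unfold regStep
    split_ifs with hc
    · exact h
    · show pr ∈ PySem.Dict.getD (PySem.Dict.modify st2.1 r0 [] (fun l => l ++ [(did, g)])) r []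
      rw [pv_getD_modify]
      split_ifs with he
      · subst he; exact List.mem_append_left _ h
      · exact h

theorem regfold_entries (did : String) (g : List String) (derived : PySem.Set String)
    (l : List String) (st2 : PySem.Dict String (List (String × List String)) × Bool)
    (r : String) (pr : String × List String)
    (h : pr ∈ PySem.Dict.getD (l.foldl (regStep did g derived) st2).1 r []) :
    pr ∈ PySem.Dict.getD st2.1 r [] ∨ pr = (did, g) := by
  induction l generalizing st2 with
  | nil => exact Or.inl h
  | cons r0 l ih =>
    rcases ih (regStep did g derived st2 r0) h with h1 | h1
    · unfold regStep at h1
      split_ifs at h1 with hc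
      · exact Or.inl h1
      · rw [pv_getD_modify] at h1
        split_ifs at h1 with he
        · rcases List.mem_append.1 h1 with h2 | h2
          · subst he; exact Or.inl h2
          · rcases List.mem_singleton.1 h2 with h3
            exact Or.inr h3
        · exact Or.inl h1
    · exact Or.inr h1

theorem regfold_reg (did : String) (g : List String) (derived : PySem.Set String)
    (l : List String) (st2 : PySem.Dict String (List (String × List String)) × Bool) :
    ∀ r ∈ l, r ∉ derived → (did, g) ∈ PySem.Dict.getD (l.foldl (regStep did g derived) st2).1 r [] := by
  induction l generalizing st2 with
  | nil => intro r hr; cases hr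
  | cons r0 l ih =>
    intro r hr hrd
    rcases List.mem_cons.1 hr with h1 | h1
    · subst h1
      have hc : ¬ PySem.Set.contains derived r = true :=
        fun hc => hrd ((PySem.Set.contains_iff _ _).1 hc)
      refine regfold_mono did g derived l _ r (did, g) ?_
      unfold regStep
      rw [if_neg hc]
      show (did, g) ∈ PySem.Dict.getD (PySem.Dict.modify st2.1 r [] (fun l => l ++ [(did, g)])) r []
      rw [pv_getD_modify, if_pos rfl]
      exact List.mem_append_right _ (List.mem_singleton.2 rfl)
    · exact ih _ r h1 hrd

-- monotone evolution of the init state: everything already recorded persists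
def StepOK (st st' : PySem.Set String × List String × PySem.Dict String (List (String × List String))) : Prop :=
  (∀ y ∈ st.1, y ∈ st'.1) ∧ (∀ y ∈ st.2.1, y ∈ st'.2.1) ∧
  (∀ r pr, pr ∈ PySem.Dict.getD st.2.2 r [] → pr ∈ PySem.Dict.getD st'.2.2 r []) ∧
  (∀ y ∈ st'.1, y ∈ st.1 ∨ y ∈ st'.2.1)

theorem StepOK_refl (st : PySem.Set String × List String × PySem.Dict String (List (String × List String))) :
    StepOK st st :=
  ⟨fun _ h => h, fun _ h => h, fun _ _ h => h, fun _ h => Or.inl h⟩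

theorem StepOK_trans {st st' st'' : PySem.Set String × List String × PySem.Dict String (List (String × List String))}
    (h1 : StepOK st st') (h2 : StepOK st' st'') : StepOK st st'' := by
  obtain ⟨a1, b1, c1, d1⟩ := h1
  obtain ⟨a2, b2, c2, d2⟩ := h2
  refine ⟨fun y h => a2 y (a1 y h), fun y h => b2 y (b1 y h), fun r pr h => c2 r pr (c1 r pr h), ?_⟩
  intro y h
  rcases d2 y h with h3 | h3
  · rcases d1 y h3 with h4 | h4
    · exact Or.inl h4
    · exact Or.inr (b2 y h4)
  · exact Or.inr h3

theorem DoneGroup_persist (st st' : PySem.Set String × List String × PySem.Dict String (List (String × List String)))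
    (hok : StepOK st st') (did : String) (g : List String)
    (hreg : RegOne st.2.2 st.1 did g) (hcov : CovOne st.2.2 st.1 st.2.1 did g) :
    RegOne st'.2.2 st'.1 did g ∧ CovOne st'.2.2 st'.1 st'.2.1 did g := by
  obtain ⟨hd, hq, hw, hnew⟩ := hok
  constructor
  · intro r hr hrd
    exact hw r _ (hreg r hr (fun hm => hrd (hd r hm)))
  · rcases hcov with h | ⟨r, hr, hwit, hrg⟩
    · exact Or.inl (hd did h)
    · rcases hwit with h1 | h1
      · by_cases h2 : r ∈ st'.1
        · rcases hnew r h2 with h3 | h3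
          · exact absurd h3 h1
          · exact Or.inr ⟨r, hr, Or.inr h3, hw r _ hrg⟩
        · exact Or.inr ⟨r, hr, Or.inl h2, hw r _ hrg⟩
      · exact Or.inr ⟨r, hr, Or.inr (hq r h1), hw r _ hrg⟩

def InvB (ac : List String) (ds : List (String × List (List String))) (derived0 : PySem.Set String)
    (st : PySem.Set String × List String × PySem.Dict String (List (String × List String))) : Prop :=
  SoundS ac ds st.1 ∧ (∀ y ∈ derived0, y ∈ st.1) ∧
  (∀ y ∈ st.1, y ∈ derived0 ∨ y ∈ st.2.1) ∧ EntriesOK ds st.2.2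

theorem dpyB_group_spec (ac : List String) (ds : List (String × List (List String)))
    (derived0 : PySem.Set String) (did : String) (conds : List (List String))
    (hdc : (did, conds) ∈ ds) (g : List String) (hg : g ∈ conds)
    (st : PySem.Set String × List String × PySem.Dict String (List (String × List String)))
    (hinv : InvB ac ds derived0 st) :
    StepOK st (dpyB_group did st g) ∧ InvB ac ds derived0 (dpyB_group did st g) ∧
    RegOne (dpyB_group did st g).2.2 (dpyB_group did st g).1 did g ∧
    CovOne (dpyB_group did st g).2.2 (dpyB_group did st g).1 (dpyB_group did st g).2.1 did g := by
  obtain ⟨hsnd, hd0, hq0, hE⟩ := hinv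
  have hgrp : dpyB_group did st g =
      if (dpyB_reg did g st.1 st.2.2).2 && !(PySem.Set.contains st.1 did) then
        (PySem.Set.add st.1 did, did :: st.2.1, (dpyB_reg did g st.1 st.2.2).1)
      else (st.1, st.2.1, (dpyB_reg did g st.1 st.2.2).1) := rfl
  have hwmono : ∀ r pr, pr ∈ PySem.Dict.getD st.2.2 r [] →
      pr ∈ PySem.Dict.getD (dpyB_reg did g st.1 st.2.2).1 r [] := by
    intro r pr h
    rw [dpyB_reg_eq]
    exact regfold_mono did g st.1 g (st.2.2, true) r pr h
  have hwent : ∀ r pr, pr ∈ PySem.Dict.getD (dpyB_reg did g st.1 st.2.2).1 r [] →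
      pr ∈ PySem.Dict.getD st.2.2 r [] ∨ pr = (did, g) := by
    intro r pr h
    rw [dpyB_reg_eq] at h
    exact regfold_entries did g st.1 g (st.2.2, true) r pr h
  have hwreg : ∀ r ∈ g, r ∉ st.1 → (did, g) ∈ PySem.Dict.getD (dpyB_reg did g st.1 st.2.2).1 r [] := by
    intro r hr hrd
    rw [dpyB_reg_eq]
    exact regfold_reg did g st.1 g (st.2.2, true) r hr hrd
  have hE' : EntriesOK ds (dpyB_reg did g st.1 st.2.2).1 := by
    intro r pr h
    rcases hwent r pr h with h1 | h1
    · exact hE r pr h1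
    · subst h1; exact ⟨conds, hdc, hg⟩
  rw [hgrp]
  by_cases hb : ((dpyB_reg did g st.1 st.2.2).2 && !(PySem.Set.contains st.1 did)) = true
  · rw [if_pos hb]
    rw [Bool.and_eq_true] at hb
    have hall : ∀ r ∈ g, r ∈ st.1 := by
      have := regfold_true did g st.1 g (st.2.2, true) (by rw [← dpyB_reg_eq]; exact hb.1)
      exact this.2
    have hokk : StepOK st (PySem.Set.add st.1 did, did :: st.2.1, (dpyB_reg did g st.1 st.2.2).1) := by
      refine ⟨fun y h => (PySem.Set.mem_add _ _ _).2 (Or.inl h),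
        fun y h => List.mem_cons_of_mem _ h, hwmono, ?_⟩
      intro y h
      rcases (PySem.Set.mem_add _ _ _).1 h with h1 | h1
      · exact Or.inl h1
      · exact Or.inr (by simp [h1])
    refine ⟨hokk, ⟨?_, ?_, ?_, hE'⟩, ?_, ?_⟩
    · intro y hy
      rcases (PySem.Set.mem_add _ _ _).1 hy with h1 | h1
      · exact hsnd y h1
      · subst h1
        exact Deriv.step y conds g hdc hg (fun r hr => hsnd r (hall r hr))
    · exact fun y hy => (PySem.Set.mem_add _ _ _).2 (Or.inl (hd0 y hy))
    · intro y hy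
      rcases (PySem.Set.mem_add _ _ _).1 hy with h1 | h1
      · rcases hq0 y h1 with h2 | h2
        · exact Or.inl h2
        · exact Or.inr (List.mem_cons_of_mem _ h2)
      · exact Or.inr (by simp [h1])
    · intro r hr hrd
      exact absurd ((PySem.Set.mem_add _ _ _).2 (Or.inl (hall r hr))) hrd
    · exact Or.inl ((PySem.Set.mem_add _ _ _).2 (Or.inr rfl))
  · rw [if_neg hb]
    have hokk : StepOK st (st.1, st.2.1, (dpyB_reg did g st.1 st.2.2).1) :=
      ⟨fun _ h => h, fun _ h => h, hwmono, fun _ h => Or.inl h⟩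
    refine ⟨hokk, ⟨hsnd, hd0, hq0, hE'⟩, fun r hr hrd => hwreg r hr hrd, ?_⟩
    by_cases hdin : did ∈ st.1
    · exact Or.inl hdin
    · have hb2 : (dpyB_reg did g st.1 st.2.2).2 = false := by
        cases hx : (dpyB_reg did g st.1 st.2.2).2
        · rfl
        · exfalso
          apply hb
          rw [Bool.and_eq_true, Bool.not_eq_true']
          refine ⟨hx, ?_⟩
          cases hcc : PySem.Set.contains st.1 did
          · rfl
          · exact absurd ((PySem.Set.contains_iff _ _).1 hcc) hdin
      have hex : ∃ r ∈ g, r ∉ st.1 := by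
        by_contra hno
        push_neg at hno
        have := regfold_eq_of_all did g st.1 g (st.2.2, true) hno
        rw [dpyB_reg_eq] at hb2
        rw [this] at hb2
        cases hb2
      obtain ⟨r, hr, hrn⟩ := hex
      exact Or.inr ⟨r, hr, Or.inl hrn, hwreg r hr hrn⟩

theorem dpyB_groups_fold (ac : List String) (ds : List (String × List (List String)))
    (derived0 : PySem.Set String) (did : String) (conds : List (List String))
    (hdc : (did, conds) ∈ ds) :
    ∀ (l : List (List String)), (∀ g ∈ l, g ∈ conds) →
      ∀ st, InvB ac ds derived0 st →
      StepOK st (l.foldl (dpyB_group did) st) ∧ InvB ac ds derived0 (l.foldl (dpyB_group did) st) ∧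
      ∀ g ∈ l, RegOne (l.foldl (dpyB_group did) st).2.2 (l.foldl (dpyB_group did) st).1 did g ∧
        CovOne (l.foldl (dpyB_group did) st).2.2 (l.foldl (dpyB_group did) st).1
          (l.foldl (dpyB_group did) st).2.1 did g := by
  intro l
  induction l with
  | nil =>
    intro _ st hinv
    exact ⟨StepOK_refl st, hinv, by intro g hg; cases hg⟩
  | cons g0 l ih =>
    intro hl st hinv
    obtain ⟨hok1, hinv1, hreg1, hcov1⟩ :=
      dpyB_group_spec ac ds derived0 did conds hdc g0 (hl g0 List.mem_cons_self) st hinv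
    obtain ⟨hok2, hinv2, hdone2⟩ :=
      ih (fun g hg => hl g (List.mem_cons_of_mem g0 hg)) (dpyB_group did st g0) hinv1
    have hfold : (g0 :: l).foldl (dpyB_group did) st = l.foldl (dpyB_group did) (dpyB_group did st g0) := rfl
    rw [hfold]
    refine ⟨StepOK_trans hok1 hok2, hinv2, ?_⟩
    intro g hg
    rcases List.mem_cons.1 hg with h1 | h1
    · subst h1
      exact DoneGroup_persist _ _ hok2 did g hreg1 hcov1
    · exact hdone2 g h1

theorem dpyB_items_fold (ac : List String) (ds : List (String × List (List String)))
    (derived0 : PySem.Set String) :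
    ∀ (l : List (String × List (List String))), (∀ p ∈ l, p ∈ ds) →
      ∀ st, InvB ac ds derived0 st →
      StepOK st (l.foldl (fun st p => p.2.foldl (dpyB_group p.1) st) st) ∧
      InvB ac ds derived0 (l.foldl (fun st p => p.2.foldl (dpyB_group p.1) st) st) ∧
      ∀ p ∈ l, ∀ g ∈ p.2,
        RegOne (l.foldl (fun st p => p.2.foldl (dpyB_group p.1) st) st).2.2
          (l.foldl (fun st p => p.2.foldl (dpyB_group p.1) st) st).1 p.1 g ∧
        CovOne (l.foldl (fun st p => p.2.foldl (dpyB_group p.1) st) st).2.2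
          (l.foldl (fun st p => p.2.foldl (dpyB_group p.1) st) st).1
          (l.foldl (fun st p => p.2.foldl (dpyB_group p.1) st) st).2.1 p.1 g := by
  intro l
  induction l with
  | nil =>
    intro _ st hinv
    exact ⟨StepOK_refl st, hinv, by intro p hp; cases hp⟩
  | cons p0 l ih =>
    intro hl st hinv
    obtain ⟨hok1, hinv1, hdone1⟩ :=
      dpyB_groups_fold ac ds derived0 p0.1 p0.2 (hl p0 List.mem_cons_self) p0.2
        (fun g hg => hg) st hinv
    obtain ⟨hok2, hinv2, hdone2⟩ :=
      ih (fun p hp => hl p (List.mem_cons_of_mem p0 hp)) (p0.2.foldl (dpyB_group p0.1) st) hinv1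
    refine ⟨StepOK_trans hok1 hok2, hinv2, ?_⟩
    intro p hp g hg
    rcases List.mem_cons.1 hp with h1 | h1
    · subst h1
      obtain ⟨hr, hc⟩ := hdone1 g hg
      exact DoneGroup_persist _ _ hok2 p.1 g hr hc
    · exact hdone2 p h1 g hg

theorem dpyB_init_spec (ac : List String) (ds : List (String × List (List String))) :
    StepOK (PySem.Set.ofList ac, [], PySem.Dict.empty) (dpyB_init ds (PySem.Set.ofList ac)) ∧
    InvB ac ds (PySem.Set.ofList ac) (dpyB_init ds (PySem.Set.ofList ac)) ∧
    ∀ p ∈ ds, ∀ g ∈ p.2,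
      RegOne (dpyB_init ds (PySem.Set.ofList ac)).2.2 (dpyB_init ds (PySem.Set.ofList ac)).1 p.1 g ∧
      CovOne (dpyB_init ds (PySem.Set.ofList ac)).2.2 (dpyB_init ds (PySem.Set.ofList ac)).1
        (dpyB_init ds (PySem.Set.ofList ac)).2.1 p.1 g := by
  have hinv0 : InvB ac ds (PySem.Set.ofList ac) (PySem.Set.ofList ac, [], PySem.Dict.empty) := by
    refine ⟨fun x hx => Deriv.base x ((PySem.Set.mem_ofList ac x).1 hx),
      fun y hy => hy, fun y hy => Or.inl hy, ?_⟩
    intro r pr h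
    simp [pysem] at h
  exact dpyB_items_fold ac ds (PySem.Set.ofList ac) ds (fun p hp => hp)
    (PySem.Set.ofList ac, [], PySem.Dict.empty) hinv0

theorem dpyB_final_iff (ac : List String) (ds : List (String × List (List String))) (x : String) :
    x ∈ (let st := dpyB_init ds (PySem.Set.ofList ac)
         dpyB_loop st.2.2 (ds.length + st.2.1.length + 1) st.1 st.2.1) ↔ Deriv ac ds x := by
  obtain ⟨hok, ⟨hsnd, hd0, hq0, hE⟩, hdone⟩ := dpyB_init_spec ac ds
  set st := dpyB_init ds (PySem.Set.ofList ac) with hst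
  have hReg : ∀ p ∈ ds, ∀ g ∈ p.2, RegOne st.2.2 st.1 p.1 g :=
    fun p hp g hg => (hdone p hp g hg).1
  have hCov : ∀ p ∈ ds, ∀ g ∈ p.2, CovOne st.2.2 st.1 st.2.1 p.1 g :=
    fun p hp g hg => (hdone p hp g hg).2
  have hfuel : st.2.1.length + missing (ds.map Prod.fst) st.1 < ds.length + st.2.1.length + 1 := by
    have h1 := missing_le_length (ds.map Prod.fst) st.1
    simp only [List.length_map] at h1
    omega
  obtain ⟨m1, m2, m3⟩ := dpyB_loop_spec ac ds st.2.2 st.1 hE hReg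
    (ds.length + st.2.1.length + 1) st.1 st.2.1 (fun y hy => hy) hsnd hCov hfuel
  constructor
  · exact fun h => m2 x h
  · exact deriv_mem_of_closed ac ds _ (fun y hy => m1 y (hd0 y ((PySem.Set.mem_ofList ac y).2 hy))) m3 x

-- ===== VERDICT (by name: the statement is the Claim_ definition above) =====
theorem derivable_descriptors_py_spec : Claim_equal_derivable_descriptors_py := by
  intro ac ds _
  unfold Spec_derivable_descriptors_py derivable_descriptors_py derivable_descriptors_py_alt
  refine congrArg PySem.Set.ofList (List.filter_congr ?_)
  intro did _
  refine Bool.eq_iff_iff.mpr ?_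
  rw [PySem.Set.contains_iff, PySem.Set.contains_iff]
  exact (dpyA_final_iff ac ds did).trans (dpyB_final_iff ac ds did).symm
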